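-- pv_equiv track=rewrite | github.com/vsayavong-netizen/web101 | backend/core/middleware/environment_protection.py | _is_path_traversal
-- ===== SOURCE A (Python) =====
-- def _is_path_traversal(path):
--     """
--     Check for path traversal attempts
--     """
--     traversal_patterns = [
--         '../',
--         '..\\',
--         '%2e%2e/',
--         '%2e%2e\\',
--         '..%2f',
--         '..%5c',
--         '%252e%252e/',
--         '%252e%252e\\',
--     ]
--
--     for pattern in traversal_patterns:
--         if pattern in path:
--             return True
--
--     return False
-- ===== SOURCE B (Python) =====
-- def _is_path_traversal(path):
--     """
--     Check for path traversal attempts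
--     """
--     patterns = ('../', '..\\', '%2e%2e/', '%2e%2e\\',
--                 '..%2f', '..%5c', '%252e%252e/', '%252e%252e\\')
--     # single positional left-to-right scan: at each index, does any pattern start here?
--     return any(path.startswith(patterns, i) for i in range(len(path)))
-- ===== Notes on version B (the rewrite author's own statement) =====
-- stated objective: alternative
-- what changed: Replaces eight independent substring scans (one per pattern, pattern-major with early return) by a single position-major left-to-right scan that at each index asks whether any pattern starts there (str.startswith with a tuple).
import Mathlib
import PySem

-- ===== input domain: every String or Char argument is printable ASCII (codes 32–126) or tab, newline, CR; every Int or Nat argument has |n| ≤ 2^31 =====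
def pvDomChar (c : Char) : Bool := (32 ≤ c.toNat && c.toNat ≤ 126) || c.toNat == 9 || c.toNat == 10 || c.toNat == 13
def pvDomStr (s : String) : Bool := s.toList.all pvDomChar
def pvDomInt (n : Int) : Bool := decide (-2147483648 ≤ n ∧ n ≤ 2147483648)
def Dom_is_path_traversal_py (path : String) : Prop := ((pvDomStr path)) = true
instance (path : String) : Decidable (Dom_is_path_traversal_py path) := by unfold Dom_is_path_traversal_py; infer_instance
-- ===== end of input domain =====

-- B replaces A's eight pattern-major substring scans by one position-major scan
-- checking at each index whether any pattern starts there (alternative, same cost).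

-- ===== PORT A =====
-- A: loop over the pattern list, early-return True on the first 'pattern in path'.
def is_path_traversal_py (path : String) : Bool :=
  ["../", "..\\", "%2e%2e/", "%2e%2e\\", "..%2f", "..%5c",
   "%252e%252e/", "%252e%252e\\"].any (fun pattern => PySem.Str.isIn pattern path)

-- ===== PORT B =====
-- B's pattern tuple, as lists of chars
def pvPats : List (List Char) :=
  ["../".toList, "..\\".toList, "%2e%2e/".toList, "%2e%2e\\".toList,
   "..%2f".toList, "..%5c".toList, "%252e%252e/".toList, "%252e%252e\\".toList]

-- 'any(path.startswith(patterns, i) for i in range(len(path)))': walk the suffixes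
def pvScan (cs : List Char) : Bool :=
  match cs with
  | [] => false
  | _ :: rest => pvPats.any (fun p => p.isPrefixOf cs) || pvScan rest

def is_path_traversal_py_alt (path : String) : Bool := pvScan path.toList

-- ===== PRECONDITION & SPEC =====
def Spec_is_path_traversal_py (path : String) (out : Bool) : Prop := out = is_path_traversal_py_alt path
instance (path : String) (out : Bool) : Decidable (Spec_is_path_traversal_py path out) := by unfold Spec_is_path_traversal_py; infer_instance

-- ===== CLAIM (what is proved, stated in full; the proofs are below) =====
def Claim_equal_is_path_traversal_py : Prop := ∀ (path : String), Dom_is_path_traversal_py path → Spec_is_path_traversal_py path (is_path_traversal_py path)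

-- ===== LEMMAS AND PROOFS =====

-- the positional scan finds exactly the patterns that occur as an infix
lemma pvScan_iff (cs : List Char) : pvScan cs = true ↔ ∃ p ∈ pvPats, p <:+: cs := by
  induction cs with
  | nil =>
    simp only [pvScan, Bool.false_eq_true, false_iff]
    rintro ⟨p, hp, hinf⟩
    have : p = [] := List.eq_nil_of_infix_nil hinf
    subst this
    revert hp; decide
  | cons c rest ih =>
    simp only [pvScan, Bool.or_eq_true, List.any_eq_true, ih,
      List.isPrefixOf_iff_prefix, List.infix_cons_iff]
    constructor
    · rintro (⟨p, hp, h⟩ | ⟨p, hp, h⟩)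
      · exact ⟨p, hp, Or.inl h⟩
      · exact ⟨p, hp, Or.inr h⟩
    · rintro ⟨p, hp, h | h⟩
      · exact Or.inl ⟨p, hp, h⟩
      · exact Or.inr ⟨p, hp, h⟩

-- ===== VERDICT (by name: the statement is the Claim_ definition above) =====
theorem is_path_traversal_py_spec : Claim_equal_is_path_traversal_py := by
  intro path _
  unfold Spec_is_path_traversal_py is_path_traversal_py is_path_traversal_py_alt
  rw [Bool.eq_iff_iff, pvScan_iff]
  simp only [List.any_eq_true, PySem.Str.isIn_iff_infix, pvPats,
    List.mem_cons, List.not_mem_nil]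
  constructor
  · rintro ⟨p, hp, h⟩
    refine ⟨p.toList, ?_, h⟩
    rcases hp with h1|h1|h1|h1|h1|h1|h1|h1|h9 <;> first | exact h9.elim | ((try subst h1) <;> decide)
  · rintro ⟨p, hp, h⟩
    rcases hp with h1|h1|h1|h1|h1|h1|h1|h1|h9 <;> (try subst h1)
    · exact ⟨"../", by decide, h⟩
    · exact ⟨"..\\", by decide, h⟩
    · exact ⟨"%2e%2e/", by decide, h⟩
    · exact ⟨"%2e%2e\\", by decide, h⟩
    · exact ⟨"..%2f", by decide, h⟩
    · exact ⟨"..%5c", by decide, h⟩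
    · exact ⟨"%252e%252e/", by decide, h⟩
    · exact ⟨"%252e%252e\\", by decide, h⟩
    · exact h9.elim
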